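-- pv_equiv track=rewrite | github.com/dinglight/ainlp_2019_summer | lessson01/assignment02.py | segment_match
-- ===== SOURCE A (Python) =====
-- def is_match(rest, saying):
--     if not rest and not saying:
--         return True
--     if not all(a.isalpha() for a in rest[0]):
--         return True
--     if rest[0] != saying[0]:
--         return False
--     return is_match(rest[1:], saying[1:])
--
-- def segment_match(pattern, saying):
--     seg_pat, rest = pattern[0], pattern[1:]
--     seg_pat = seg_pat.replace('?*', '?')
--
--     if not rest: return (seg_pat, saying), len(saying)
--
--     for i, token in enumerate(saying):
--         if rest[0] == token and is_match(rest[1:], saying[(i + 1):]):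
--             return (seg_pat, saying[:i]), i
--
--     return (seg_pat, saying), len(saying)
-- ===== SOURCE B (Python) =====
-- def _tail_ok(pattern, saying, j, k):
--     while True:
--         if j == len(pattern) and k == len(saying):
--             return True
--         if not all(a.isalpha() for a in pattern[j]):
--             return True
--         if pattern[j] != saying[k]:
--             return False
--         j += 1
--         k += 1
--
-- def segment_match(pattern, saying):
--     seg_pat = pattern[0].replace('?*', '?')
--     if len(pattern) == 1:
--         return (seg_pat, saying), len(saying)
--     for i in range(len(saying)):
--         if saying[i] == pattern[1] and _tail_ok(pattern, saying, 2, i + 1):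
--             return (seg_pat, saying[:i]), i
--     return (seg_pat, saying), len(saying)
-- ===== Notes on version B (the rewrite author's own statement) =====
-- stated objective: alternative
-- what changed: is_match's slice-building recursion is replaced by an iterative index-based lockstep loop (_tail_ok) walking the original lists in place, and the outer scan indexes saying directly, so no intermediate list copies are built.
import Mathlib
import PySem

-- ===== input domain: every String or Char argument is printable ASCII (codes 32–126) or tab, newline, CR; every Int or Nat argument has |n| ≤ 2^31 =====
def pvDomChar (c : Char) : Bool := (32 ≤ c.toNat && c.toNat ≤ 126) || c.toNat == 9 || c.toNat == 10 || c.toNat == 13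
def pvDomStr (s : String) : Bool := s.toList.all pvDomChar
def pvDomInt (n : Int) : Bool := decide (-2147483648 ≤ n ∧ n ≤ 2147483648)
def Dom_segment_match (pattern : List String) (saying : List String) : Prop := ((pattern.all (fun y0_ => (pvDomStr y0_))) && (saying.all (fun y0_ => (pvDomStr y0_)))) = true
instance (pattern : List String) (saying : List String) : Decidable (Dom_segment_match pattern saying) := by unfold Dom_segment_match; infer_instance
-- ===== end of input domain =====

-- B replaces is_match's slice-building recursion by an index-based lockstep while-loop over the
-- original lists, building no intermediate list copies; objective: alternative decomposition.
-- ===== PORT A =====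
-- all(a.isalpha() for a in t)
def allAlphaTok (t : String) : Bool := t.toList.all PySem.Chars.isalpha

def is_matchA (rest saying : List String) : Bool :=
  if rest = [] ∧ saying = [] then true
  else
    match rest with
    | [] => true            -- Python raises IndexError at rest[0]; value unreachable under Pre_
    | r0 :: rtl =>
      if ¬ allAlphaTok r0 then true
      else
        match saying with
        | [] => false       -- Python raises IndexError at saying[0]; unreachable under Pre_
        | s0 :: stl => if r0 ≠ s0 then false else is_matchA rtl stl

-- for i, token in enumerate(saying): …
def segA_loop (seg_pat r0 : String) (rtl saying : List String) (i : Nat) (todo : List String) :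
    (String × List String) × Int :=
  match todo with
  | [] => ((seg_pat, saying), (saying.length : Int))
  | token :: ts =>
    if r0 = token ∧ is_matchA rtl (PySem.List.slice saying (some ((i : Int) + 1)) none) then
      ((seg_pat, PySem.List.slice saying none (some (i : Int))), (i : Int))
    else segA_loop seg_pat r0 rtl saying (i + 1) ts

def segment_match (pattern : List String) (saying : List String) : (String × List String) × Int :=
  match PySem.List.pyGet? pattern 0 with
  | none => (("", []), 0)   -- Python raises IndexError at pattern[0]; unreachable under Pre_
  | some p0 =>
    let seg_pat := PySem.Str.replace p0 "?*" "?"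
    match PySem.List.slice pattern (some 1) none with    -- rest = pattern[1:]
    | [] => ((seg_pat, saying), (saying.length : Int))
    | r0 :: rtl => segA_loop seg_pat r0 rtl saying 0 saying

-- ===== PORT B =====
-- while-loop of _tail_ok: indices j, k walk the original lists in lockstep
def tail_ok (pattern saying : List String) (j k : Nat) : Bool :=
  if j = pattern.length ∧ k = saying.length then true
  else
    match h : PySem.List.pyGet? pattern (j : Int) with
    | none => true          -- Python raises IndexError at pattern[j]; unreachable under Pre_
    | some t =>
      if ¬ allAlphaTok t then true
      else
        match PySem.List.pyGet? saying (k : Int) with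
        | none => false     -- Python raises IndexError at saying[k]; unreachable under Pre_
        | some u => if t ≠ u then false else tail_ok pattern saying (j + 1) (k + 1)
termination_by pattern.length - j
decreasing_by
  have : j < pattern.length := by
    by_contra hge
    simp [PySem.List.pyGet?_natCast, List.getElem?_eq_none (by omega : pattern.length ≤ j)] at h
  omega

-- for i in range(len(saying)): …
def segB_loop (pattern saying : List String) (seg_pat : String) (i : Nat) :
    (String × List String) × Int :=
  if i < saying.length then
    if PySem.List.pyGet? saying (i : Int) = PySem.List.pyGet? pattern 1 ∧ tail_ok pattern saying 2 (i + 1) then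
      ((seg_pat, saying.take i), (i : Int))
    else segB_loop pattern saying seg_pat (i + 1)
  else ((seg_pat, saying), (saying.length : Int))
termination_by saying.length - i

def segment_match_alt (pattern : List String) (saying : List String) : (String × List String) × Int :=
  match PySem.List.pyGet? pattern 0 with
  | none => (("", []), 0)   -- Python raises IndexError at pattern[0]; unreachable under Pre_
  | some p0 =>
    let seg_pat := PySem.Str.replace p0 "?*" "?"
    if pattern.length = 1 then ((seg_pat, saying), (saying.length : Int))
    else segB_loop pattern saying seg_pat 0

-- ===== PRECONDITION & SPEC =====
-- the tokens r[0..k) are each all-alpha and equal to s[0..k): exactly the states is_match reaches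
def eqAlphaPre (r s : List String) (k : Nat) : Bool :=
  (List.range k).all fun j =>
    decide (j < s.length) && (r.getD j "" == s.getD j "") && allAlphaTok (r.getD j "")

-- is_match r s returns (rather than raising IndexError): no reachable lockstep state runs off
-- the end of exactly one list (with an all-alpha next token when r is the longer one)
def mSafe (r s : List String) : Bool :=
  (List.range (r.length + 1)).all fun k =>
    !(eqAlphaPre r s k) ||
      !((k == r.length && decide (k < s.length)) ||
        (decide (k < r.length) && (k == s.length) && allAlphaTok (r.getD k "")))

-- is_match r s returns True: some reachable lockstep state hits the double-end or a
-- non-all-alpha token of r (after such a success the outer loop stops scanning)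
def mSucc (r s : List String) : Bool :=
  (List.range (r.length + 1)).any fun k =>
    eqAlphaPre r s k &&
      ((k == r.length && k == s.length) ||
       (decide (k < r.length) && !allAlphaTok (r.getD k "")))

-- Pre_ excludes exactly the inputs on which Python A raises IndexError: an empty pattern, or a
-- position i of saying matching pattern[1] that the outer loop still reaches (no earlier matching
-- position already returned True) where the is_match lockstep runs off one list's end.
def Pre_segment_match (pattern : List String) (saying : List String) : Prop :=
  pattern ≠ [] ∧
  (pattern.length = 1 ∨
    ∀ i < saying.length, saying.getD i "" = pattern.getD 1 "" →
      (∀ j < i, saying.getD j "" = pattern.getD 1 "" →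
        mSucc (pattern.drop 2) (saying.drop (j + 1)) = false) →
      mSafe (pattern.drop 2) (saying.drop (i + 1)) = true)

instance (pattern : List String) (saying : List String) : Decidable (Pre_segment_match pattern saying) := by
  unfold Pre_segment_match; infer_instance

def pvWitness_segment_match : List String × List String := (["?*x", "hello"], ["hi", "hello"])

def Spec_segment_match (pattern : List String) (saying : List String) (out : (String × List String) × Int) : Prop := out = segment_match_alt pattern saying
instance (pattern : List String) (saying : List String) (out : (String × List String) × Int) : Decidable (Spec_segment_match pattern saying out) := by unfold Spec_segment_match; infer_instance

-- ===== CLAIM (what is proved, stated in full; the proofs are below) =====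
def Claim_equal_segment_match : Prop := ∀ (pattern : List String) (saying : List String), Dom_segment_match pattern saying → Pre_segment_match pattern saying → Spec_segment_match pattern saying (segment_match pattern saying)

-- ===== LEMMAS AND PROOFS =====

-- the index-lockstep loop computes exactly what the slice-recursion computes
theorem tail_ok_eq_is_matchA (p s : List String) (j k : Nat)
    (hj : j ≤ p.length) (hk : k ≤ s.length) :
    tail_ok p s j k = is_matchA (p.drop j) (s.drop k) := by
  fun_induction tail_ok p s j k with
  | case1 j k hend =>
    obtain ⟨hjl, hkl⟩ := hend
    simp [is_matchA, List.drop_eq_nil_of_le, hjl.ge, hkl.ge]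
  | case2 j k hend h =>
    rw [PySem.List.pyGet?_natCast, List.getElem?_eq_none_iff] at h
    have hj' : j = p.length := le_antisymm hj h
    have hk' : k < s.length := by
      rcases Nat.lt_or_ge k s.length with h' | h'
      · exact h'
      · exact absurd ⟨hj', le_antisymm hk h'⟩ hend
    rw [List.drop_eq_nil_of_le h, List.drop_eq_getElem_cons hk']
    simp [is_matchA]
  | case3 j k hend t h halpha =>
    rw [PySem.List.pyGet?_natCast, List.getElem?_eq_some_iff] at h
    obtain ⟨hjl, ht⟩ := h
    rw [List.drop_eq_getElem_cons hjl]
    simp [is_matchA, ht, halpha]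
  | case4 j k hend t h halpha h2 =>
    rw [PySem.List.pyGet?_natCast, List.getElem?_eq_some_iff] at h
    obtain ⟨hjl, ht⟩ := h
    rw [PySem.List.pyGet?_natCast, List.getElem?_eq_none_iff] at h2
    rw [List.drop_eq_getElem_cons hjl, List.drop_eq_nil_of_le h2]
    simp [is_matchA, ht, halpha]
  | case5 j k hend t h halpha u h2 hne =>
    rw [PySem.List.pyGet?_natCast, List.getElem?_eq_some_iff] at h
    obtain ⟨hjl, ht⟩ := h
    rw [PySem.List.pyGet?_natCast, List.getElem?_eq_some_iff] at h2
    obtain ⟨hkl, hu⟩ := h2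
    rw [List.drop_eq_getElem_cons hjl, List.drop_eq_getElem_cons hkl]
    simp only [is_matchA, ht, hu]
    simp [halpha, hne]
  | case6 j k hend t h halpha u h2 heq ih =>
    rw [PySem.List.pyGet?_natCast, List.getElem?_eq_some_iff] at h
    obtain ⟨hjl, ht⟩ := h
    rw [PySem.List.pyGet?_natCast, List.getElem?_eq_some_iff] at h2
    obtain ⟨hkl, hu⟩ := h2
    have hteq : t = u := of_not_not heq
    rw [List.drop_eq_getElem_cons hjl, List.drop_eq_getElem_cons hkl]
    simp only [is_matchA, ht, hu]
    have ha' : allAlphaTok t = true := not_not.mp halpha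
    have ha2 : allAlphaTok u = true := hteq ▸ ha'
    simp [ih hjl hkl, ha2, hteq]

theorem segB_loop_eq_segA_loop (p s : List String) (sp r0 : String) (rtl : List String)
    (hp : p.drop 1 = r0 :: rtl) (i : Nat) (hi : i ≤ s.length) :
    segB_loop p s sp i = segA_loop sp r0 rtl s i (s.drop i) := by
  have hlen : 2 ≤ p.length := by
    have := congrArg List.length hp
    simp at this
    omega
  have hr0' : p[1]? = some r0 := by
    have := congrArg (fun xs => xs[0]?) hp
    simpa using this
  have hr0 : p[1]'(by omega) = r0 := (List.getElem?_eq_some_iff.mp hr0').2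
  have hrtl : p.drop 2 = rtl := by
    have := congrArg (List.drop 1) hp
    simpa [List.drop_drop] using this
  fun_induction segB_loop p s sp i with
  | case1 i hil hcond =>
    rw [List.drop_eq_getElem_cons hil]
    rw [segA_loop]
    obtain ⟨hc1, hc2⟩ := hcond
    have htok : r0 = s[i] := by
      rw [show (1 : Int) = ((1 : Nat) : Int) from rfl] at hc1
      rw [PySem.List.pyGet?_natCast, PySem.List.pyGet?_natCast] at hc1
      rw [hr0'] at hc1
      rw [List.getElem?_eq_some_iff] at hc1
      exact hc1.2.symm
    have hslice : PySem.List.slice s (some ((i : Int) + 1)) none = s.drop (i + 1) := by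
      have : ((i : Int) + 1) = ((i + 1 : Nat) : Int) := by push_cast; ring
      rw [this, PySem.List.slice_from_natCast]
    have hmatch : is_matchA rtl (s.drop (i + 1)) = true := by
      rw [← hrtl, ← tail_ok_eq_is_matchA p s 2 (i + 1) (by omega) (by omega)]
      exact hc2
    rw [if_pos ⟨htok, by rw [hslice]; exact hmatch⟩]
    have : PySem.List.slice s none (some (i : Int)) = s.take i := PySem.List.slice_to_natCast ..
    rw [this]
  | case2 i hil hcond ih =>
    rw [List.drop_eq_getElem_cons hil]
    rw [segA_loop]
    rw [if_neg]
    · exact ih (by omega) hr0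
    · intro ⟨htok, hm⟩
      apply hcond
      constructor
      · rw [show (1 : Int) = ((1 : Nat) : Int) from rfl]
        rw [PySem.List.pyGet?_natCast, PySem.List.pyGet?_natCast, hr0']
        rw [List.getElem?_eq_some_iff]
        exact ⟨hil, htok.symm⟩
      · rw [tail_ok_eq_is_matchA p s 2 (i + 1) (by omega) (by omega), hrtl]
        have : ((i : Int) + 1) = ((i + 1 : Nat) : Int) := by push_cast; ring
        rw [this, PySem.List.slice_from_natCast] at hm
        exact hm
  | case3 i hge =>
    rw [List.drop_eq_nil_of_le (by omega), segA_loop]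

theorem ports_eq (p s : List String) : segment_match p s = segment_match_alt p s := by
  unfold segment_match segment_match_alt
  match h : PySem.List.pyGet? p 0 with
  | none => rfl
  | some p0 =>
    have hp : p ≠ [] := by
      intro he; subst he; simp [PySem.List.pyGet?] at h
    have hslice : PySem.List.slice p (some 1) none = p.drop 1 := by
      have : (1 : Int) = ((1 : Nat) : Int) := rfl
      rw [this, PySem.List.slice_from_natCast]
    rw [hslice]
    dsimp only
    match h1 : p.drop 1 with
    | [] =>
      have : p.length = 1 := by
        have := congrArg List.length h1
        simp at this
        cases p with
        | nil => exact absurd rfl hp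
        | cons a l => simp at this ⊢; omega
      simp [this]
    | r0 :: rtl =>
      have hlen : 2 ≤ p.length := by
        have := congrArg List.length h1
        simp at this
        omega
      rw [if_neg (by omega)]
      exact (segB_loop_eq_segA_loop p s _ r0 rtl h1 0 (by omega)).symm

-- ===== VERDICT (by name: the statement is the Claim_ definition above) =====
theorem segment_match_spec : Claim_equal_segment_match := by
  intro p s _ _
  unfold Spec_segment_match
  exact ports_eq p s
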